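-- pv_equiv track=rewrite | github.com/BuckinghamAJ/GameDealsWebApp | findingGameDeals/findGameDeals.py | createscrapyURLs
-- ===== SOURCE A (Python) =====
-- def createscrapyURLs(videoGameDeals):
--
--     for deal in videoGameDeals:
--         if "Switch Link" in deal:
--             urlTitleFormat = deal["title"].lower().replace(" ", "-").replace("®", "").replace("™", "").replace(":", "").replace("'","")
--             metacriticURL = "https://www.metacritic.com/game/switch/" + urlTitleFormat
--             deal["metacriticURL"] = metacriticURL
--         elif "Xbox Link" in deal:
--             urlTitleFormat = deal["title"].lower().replace(" ", "-").replace("®","").replace("™", "").replace(":","").replace("'","")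
--             metacriticURL = "https://www.metacritic.com/game/xbox-one/" + urlTitleFormat
--             deal["metacriticURL"] = metacriticURL
--         elif "PS Link" in deal:
--             urlTitleFormat = deal["title"].lower().replace(" ", "-").replace("®", "").replace("™", "").replace(":", "").replace("'","")
--             metacriticURL = "https://www.metacritic.com/game/playstation-4/" + urlTitleFormat
--             deal["metacriticURL"] = metacriticURL
--
--     return videoGameDeals
-- ===== SOURCE B (Python) =====
-- # B: one min-rank scan over the keys instead of three membership tests, and a single
-- # character-level scan of the lowered title instead of five whole-string replace passes;
-- # pure rebuild (no in-place mutation; return value identical to A's).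
--
-- _RANK = {"Switch Link": 0, "Xbox Link": 1, "PS Link": 2}
-- _SLUGS = ["switch", "xbox-one", "playstation-4"]
-- _DROP = "\u00ae\u2122:'"
--
--
-- def _slugify(title):
--     chars = []
--     for c in title.lower():
--         if c == " ":
--             chars.append("-")
--         elif c not in _DROP:
--             chars.append(c)
--     return "".join(chars)
--
--
-- def createscrapyURLs(videoGameDeals):
--     result = []
--     for deal in videoGameDeals:
--         rank = 3
--         for k in deal:
--             rank = min(rank, _RANK.get(k, 3))
--         if rank < 3:
--             new = dict(deal)
--             new["metacriticURL"] = ("https://www.metacritic.com/game/"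
--                                     + _SLUGS[rank] + "/" + _slugify(deal["title"]))
--             result.append(new)
--         else:
--             result.append(deal)
--     return result
-- ===== Notes on version B (the rewrite author's own statement) =====
-- stated objective: alternative
-- what changed: Per deal B computes one minimum-priority rank in a single scan over the keys instead of A's three if/elif membership tests, and builds the URL slug by a single character-level scan of the lowered title instead of A's chain of five whole-string replace passes; B rebuilds the dicts purely instead of mutating in place.
import Mathlib
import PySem

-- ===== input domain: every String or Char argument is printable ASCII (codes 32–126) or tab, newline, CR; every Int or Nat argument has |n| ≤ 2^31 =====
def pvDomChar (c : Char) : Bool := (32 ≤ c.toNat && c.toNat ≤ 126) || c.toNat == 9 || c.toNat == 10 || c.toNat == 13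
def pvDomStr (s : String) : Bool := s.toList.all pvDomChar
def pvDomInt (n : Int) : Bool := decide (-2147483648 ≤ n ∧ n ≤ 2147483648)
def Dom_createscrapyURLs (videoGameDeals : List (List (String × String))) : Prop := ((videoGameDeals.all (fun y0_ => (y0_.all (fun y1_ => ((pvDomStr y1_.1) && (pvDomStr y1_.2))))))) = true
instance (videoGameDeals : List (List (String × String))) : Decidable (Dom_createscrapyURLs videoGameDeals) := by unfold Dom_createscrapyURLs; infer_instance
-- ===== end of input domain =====

-- B replaces A's three if/elif membership tests by one min-rank scan over the keys and A's
-- chain of five whole-string replace passes by one character-level scan of the lowered title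
-- (alternative); A mutates the dicts in place, B rebuilds them — the equivalence proved here
-- is about the RETURN value only.

-- ===== PORT A =====
-- per-deal body of A's loop; deal["title"] (KeyError when absent) is ported as
-- (get? "title").getD "", exact on Pre_ which guarantees presence of "title".
def pvADeal (deal : List (String × String)) : List (String × String) :=
  let d := PySem.Dict.mk deal
  if d.contains "Switch Link" then
    let urlTitleFormat := PySem.Str.replace (PySem.Str.replace (PySem.Str.replace (PySem.Str.replace (PySem.Str.replace (PySem.Str.lower ((d.get? "title").getD "")) " " "-") "®" "") "™" "") ":" "") "'" ""
    (d.insert "metacriticURL" ("https://www.metacritic.com/game/switch/" ++ urlTitleFormat)).items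
  else if d.contains "Xbox Link" then
    let urlTitleFormat := PySem.Str.replace (PySem.Str.replace (PySem.Str.replace (PySem.Str.replace (PySem.Str.replace (PySem.Str.lower ((d.get? "title").getD "")) " " "-") "®" "") "™" "") ":" "") "'" ""
    (d.insert "metacriticURL" ("https://www.metacritic.com/game/xbox-one/" ++ urlTitleFormat)).items
  else if d.contains "PS Link" then
    let urlTitleFormat := PySem.Str.replace (PySem.Str.replace (PySem.Str.replace (PySem.Str.replace (PySem.Str.replace (PySem.Str.lower ((d.get? "title").getD "")) " " "-") "®" "") "™" "") ":" "") "'" ""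
    (d.insert "metacriticURL" ("https://www.metacritic.com/game/playstation-4/" ++ urlTitleFormat)).items
  else deal

def createscrapyURLs (videoGameDeals : List (List (String × String))) : List (List (String × String)) :=
  videoGameDeals.map pvADeal

-- ===== PORT B =====
def pvRank (k : String) : Nat :=
  if k = "Switch Link" then 0 else if k = "Xbox Link" then 1 else if k = "PS Link" then 2 else 3

def pvSlugs : List String := ["switch", "xbox-one", "playstation-4"]

-- one character of B's single-pass slug builder (" "→"-", drop "®™:'", keep the rest)
def pvSlugChar (c : Char) : List Char :=
  if c = ' ' then ['-']
  else if c = '®' ∨ c = '™' ∨ c = ':' ∨ c = '\'' then []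
  else [c]

def pvSlugify (title : String) : String :=
  String.ofList ((PySem.Str.lower title).toList.flatMap pvSlugChar)

def pvBDeal (deal : List (String × String)) : List (String × String) :=
  let d := PySem.Dict.mk deal
  let rank := d.keys.foldl (fun r k => min r (pvRank k)) 3
  if rank < 3 then
    (d.insert "metacriticURL"
      ("https://www.metacritic.com/game/" ++ (PySem.List.pyGet? pvSlugs (rank : Int)).getD "" ++ "/"
        ++ pvSlugify ((d.get? "title").getD ""))).items
  else deal

def createscrapyURLs_alt (videoGameDeals : List (List (String × String))) : List (List (String × String)) :=
  videoGameDeals.map pvBDeal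

-- ===== PRECONDITION & SPEC =====
-- Pre_ excludes exactly the inputs where A raises KeyError: a deal that has one of the
-- three link keys but no "title" key.
def Pre_createscrapyURLs (videoGameDeals : List (List (String × String))) : Prop :=
  (videoGameDeals.all (fun deal =>
    let d := PySem.Dict.mk deal
    !(d.contains "Switch Link" || d.contains "Xbox Link" || d.contains "PS Link") || d.contains "title")) = true
instance (videoGameDeals : List (List (String × String))) : Decidable (Pre_createscrapyURLs videoGameDeals) := by unfold Pre_createscrapyURLs; infer_instance

def pvWitness_createscrapyURLs : (List (List (String × String))) :=
  [[("Switch Link", "http://x"), ("title", "Mario: Kart's")], [("foo", "bar")]]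

def Spec_createscrapyURLs (videoGameDeals : List (List (String × String))) (out : List (List (String × String))) : Prop := out = createscrapyURLs_alt videoGameDeals
instance (videoGameDeals : List (List (String × String))) (out : List (List (String × String))) : Decidable (Spec_createscrapyURLs videoGameDeals out) := by unfold Spec_createscrapyURLs; infer_instance

-- ===== CLAIM =====
def Claim_equal_createscrapyURLs : Prop := ∀ (videoGameDeals : List (List (String × String))), Dom_createscrapyURLs videoGameDeals → Pre_createscrapyURLs videoGameDeals → Spec_createscrapyURLs videoGameDeals (createscrapyURLs videoGameDeals)

-- ===== LEMMAS AND PROOFS =====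

-- single-char replace with list-valued new is a flatMap
theorem pvReplace_go_single (a : Char) (new : List Char) :
    ∀ (s acc : List Char), PySem.Chars.replace.go [a] new s.length s acc
      = acc.reverse ++ s.flatMap (fun c => if c = a then new else [c]) := by
  intro s
  induction s with
  | nil => intro acc; simp [PySem.Chars.replace.go]
  | cons c t ih =>
    intro acc
    show PySem.Chars.replace.go [a] new (t.length + 1) (c :: t) acc = _
    rw [PySem.Chars.replace.go]
    by_cases h : c = a
    · subst h
      simp [List.isPrefixOf, ih]
    · have hpf : [a].isPrefixOf (c :: t) = false := by
        simp [List.isPrefixOf]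
        exact fun hac => absurd hac.symm h
      simp [hpf, ih, h]


theorem pvReplace_single (a : Char) (new s : List Char) :
    PySem.Chars.replace s [a] new = s.flatMap (fun c => if c = a then new else [c]) := by
  unfold PySem.Chars.replace
  simp [pvReplace_go_single]

theorem pvChain_toList (l : List Char) :
    PySem.Chars.replace (PySem.Chars.replace (PySem.Chars.replace (PySem.Chars.replace (PySem.Chars.replace l [' '] ['-']) ['®'] []) ['™'] []) [':'] []) ['\''] []
      = l.flatMap pvSlugChar := by
  simp only [pvReplace_single, List.flatMap_assoc]
  congr 1
  funext c
  by_cases h1 : c = ' '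
  · subst h1; decide
  by_cases h2 : c = '®'
  · subst h2; decide
  by_cases h3 : c = '™'
  · subst h3; decide
  by_cases h4 : c = ':'
  · subst h4; decide
  by_cases h5 : c = '\''
  · subst h5; decide
  simp [pvSlugChar, h1, h2, h3, h4, h5]

-- the five-replace chain equals B's one-pass character substitution
theorem pvChain_eq (s : String) :
    PySem.Str.replace (PySem.Str.replace (PySem.Str.replace (PySem.Str.replace (PySem.Str.replace s " " "-") "®" "") "™" "") ":" "") "'" ""
      = String.ofList (s.toList.flatMap pvSlugChar) := by
  apply String.toList_inj.mp
  simp only [PySem.Str.toList_replace]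
  simpa using pvChain_toList s.toList

theorem pvRank_le (k : String) : pvRank k ≤ 3 := by
  unfold pvRank; split_ifs <;> omega

-- characterization of B's min-rank scan
theorem pvMinRank_acc (keys : List String) (r : Nat) (hr : r ≤ 3) :
    keys.foldl (fun r k => min r (pvRank k)) r = min r (keys.foldl (fun r k => min r (pvRank k)) 3) := by
  induction keys generalizing r with
  | nil => simpa using (Nat.min_eq_left hr).symm
  | cons k ks ih =>
    simp only [List.foldl_cons]
    rw [ih (min r (pvRank k)) (by omega), ih (min 3 (pvRank k)) (by omega)]
    have := pvRank_le k
    omega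

theorem pvMinRank_eq (keys : List String) :
    keys.foldl (fun r k => min r (pvRank k)) 3
      = if "Switch Link" ∈ keys then 0 else if "Xbox Link" ∈ keys then 1
        else if "PS Link" ∈ keys then 2 else 3 := by
  induction keys with
  | nil => simp
  | cons k ks ih =>
    simp only [List.foldl_cons, List.mem_cons]
    rw [pvMinRank_acc _ _ (by have := pvRank_le k; omega), ih]
    by_cases h1 : k = "Switch Link"
    · subst h1; simp [pvRank]
    by_cases h2 : k = "Xbox Link"
    · subst h2
      simp only [pvRank, if_neg (by decide : ¬("Xbox Link" = "Switch Link"))]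
      split_ifs <;> simp_all
    by_cases h3 : k = "PS Link"
    · subst h3
      simp only [pvRank, if_neg (by decide : ¬("PS Link" = "Switch Link")),
        if_neg (by decide : ¬("PS Link" = "Xbox Link"))]
      split_ifs <;> simp_all
    · have hr : pvRank k = 3 := by simp [pvRank, h1, h2, h3]
      simp [hr, Ne.symm h1, Ne.symm h2, Ne.symm h3]
      split_ifs <;> simp

theorem pvContains_iff (deal : List (String × String)) (k : String) :
    (PySem.Dict.mk deal).contains k = true ↔ k ∈ (PySem.Dict.mk deal).keys := by
  exact PySem.Dict.contains_iff_mem_keys _ _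

theorem pvDeal_eq (deal : List (String × String)) : pvADeal deal = pvBDeal deal := by
  unfold pvADeal pvBDeal
  simp only [pvMinRank_eq]
  by_cases h1 : (PySem.Dict.mk deal).contains "Switch Link" = true
  · rw [if_pos ((pvContains_iff _ _).mp h1)]
    simp [h1, pvChain_eq, pvSlugify, PySem.List.pyGet?, PySem.List.pyIdx?, pvSlugs]
  · rw [if_neg (fun hm => h1 ((pvContains_iff _ _).mpr hm))]
    by_cases h2 : (PySem.Dict.mk deal).contains "Xbox Link" = true
    · rw [if_pos ((pvContains_iff _ _).mp h2)]
      simp [h1, h2, pvChain_eq, pvSlugify, PySem.List.pyGet?, PySem.List.pyIdx?, pvSlugs]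
    · rw [if_neg (fun hm => h2 ((pvContains_iff _ _).mpr hm))]
      by_cases h3 : (PySem.Dict.mk deal).contains "PS Link" = true
      · rw [if_pos ((pvContains_iff _ _).mp h3)]
        simp [h1, h2, h3, pvChain_eq, pvSlugify, PySem.List.pyGet?, PySem.List.pyIdx?, pvSlugs]
      · rw [if_neg (fun hm => h3 ((pvContains_iff _ _).mpr hm))]
        simp [h1, h2, h3]

-- ===== VERDICT =====
theorem createscrapyURLs_spec : Claim_equal_createscrapyURLs := by
  intro vg _ _
  unfold Spec_createscrapyURLs createscrapyURLs createscrapyURLs_alt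
  exact List.map_congr_left (fun deal _ => pvDeal_eq deal)
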